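-- pv_equiv track=rewrite | github.com/AtharSayed/Ner_System | data/processed_data/news/preproc_news.py | standardize_terms
-- ===== SOURCE A (Python) =====
-- def standardize_terms(text):
--     terms_dict = {
--         'usd': 'U.S. dollars',
--         '$': 'U.S. dollars',
--         'q1': 'Q1',
--         'q2': 'Q2',
--         'q3': 'Q3',
--         'q4': 'Q4',
--     }
--     for term, replacement in terms_dict.items():
--         text = text.replace(term, replacement)
--     return text
-- ===== SOURCE B (Python) =====
-- def standardize_terms(text):
--     # Single left-to-right scan: at each position emit the replacement for the
--     # term starting there ('$', 'usd', 'q1'..'q4') or the character itself.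
--     out = []
--     i = 0
--     n = len(text)
--     while i < n:
--         c = text[i]
--         if c == '$':
--             out.append('U.S. dollars')
--             i += 1
--         elif text.startswith('usd', i):
--             out.append('U.S. dollars')
--             i += 3
--         elif c == 'q' and i + 1 < n and text[i + 1] in '1234':
--             out.append('Q' + text[i + 1])
--             i += 2
--         else:
--             out.append(c)
--             i += 1
--     return ''.join(out)
-- ===== Notes on version B (the rewrite author's own statement) =====
-- stated objective: alternative
-- what changed: Replaces the six sequential full-text str.replace passes by a single left-to-right scan that emits the replacement for whichever term ('$', 'usd', 'q1'..'q4') starts at each position; one pass over the text instead of six, though the interpreted loop is not faster than CPython's C-level str.replace.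
import Mathlib
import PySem

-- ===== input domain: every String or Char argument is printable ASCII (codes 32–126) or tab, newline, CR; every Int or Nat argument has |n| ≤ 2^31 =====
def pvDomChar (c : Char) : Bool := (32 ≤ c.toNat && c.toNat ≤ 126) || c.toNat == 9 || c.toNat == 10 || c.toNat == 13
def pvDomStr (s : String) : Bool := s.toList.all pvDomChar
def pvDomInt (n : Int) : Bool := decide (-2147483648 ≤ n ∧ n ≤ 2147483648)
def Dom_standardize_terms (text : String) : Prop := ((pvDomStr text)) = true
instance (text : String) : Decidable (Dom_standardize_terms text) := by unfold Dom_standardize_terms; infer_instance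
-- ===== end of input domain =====

-- B replaces A's six sequential full-text replace passes by one left-to-right scan (objective: alternative, one pass instead of six).

-- ===== PORT A =====
-- literal port of A: a dict of terms, then one str.replace per item, in insertion order
def standardize_terms (text : String) : String :=
  let terms_dict : PySem.Dict String String := PySem.Dict.ofList
    [("usd", "U.S. dollars"), ("$", "U.S. dollars"),
     ("q1", "Q1"), ("q2", "Q2"), ("q3", "Q3"), ("q4", "Q4")]
  terms_dict.items.foldl (fun t p => PySem.Str.replace t p.1 p.2) text

-- ===== PORT B =====
-- the replacement string 'U.S. dollars' of Source B
def pvRepl : List Char := ['U', '.', 'S', '.', ' ', 'd', 'o', 'l', 'l', 'a', 'r', 's']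

-- Source B's while loop over positions, as the structural recursion on the remaining
-- suffix; each out.append(chunk) becomes 'chunk ++ …' (''.join at the end is the
-- concatenation of the chunks in order)
def pvScan : List Char → List Char
  | [] => []
  | c :: t =>
    if c = '$' then pvRepl ++ pvScan t
    else if c = 'u' ∧ ['s', 'd'].isPrefixOf t then pvRepl ++ pvScan (t.drop 2)
    else if c = 'q' ∧ (t.head? = some '1' ∨ t.head? = some '2' ∨ t.head? = some '3' ∨ t.head? = some '4') then
      'Q' :: (t.head?.getD ' ') :: pvScan t.tail
    else c :: pvScan t
termination_by l => l.length
decreasing_by all_goals (simp [List.length_drop]; try omega)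

def standardize_terms_alt (text : String) : String :=
  String.ofList (pvScan text.toList)

-- ===== PRECONDITION & SPEC =====
def Spec_standardize_terms (text : String) (out : String) : Prop := out = standardize_terms_alt text
instance (text : String) (out : String) : Decidable (Spec_standardize_terms text out) := by unfold Spec_standardize_terms; infer_instance

-- ===== CLAIM (what is proved, stated in full; the proofs are below) =====
def Claim_equal_standardize_terms : Prop := ∀ (text : String), Dom_standardize_terms text → Spec_standardize_terms text (standardize_terms text)

-- ===== LEMMAS AND PROOFS =====

-- fuel-free model of PySem.Chars.replace (for a nonempty pattern)
def pvRep (old new : List Char) : List Char → List Char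
  | [] => []
  | c :: t =>
    if old.isPrefixOf (c :: t) then new ++ pvRep old new (t.drop (old.length - 1))
    else c :: pvRep old new t
termination_by l => l.length
decreasing_by all_goals (simp [List.length_drop]; try omega)

lemma pv_go_spec (old new : List Char) (ho : old ≠ []) :
    ∀ (fuel : Nat) (l acc : List Char), l.length ≤ fuel →
      PySem.Chars.replace.go old new fuel l acc = acc.reverse ++ pvRep old new l := by
  intro fuel
  induction fuel with
  | zero =>
    intro l acc hl
    have : l = [] := List.eq_nil_of_length_eq_zero (Nat.le_zero.mp hl)
    subst this
    simp [PySem.Chars.replace.go, pvRep]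
  | succ n ih =>
    intro l acc hl
    cases l with
    | nil => simp [PySem.Chars.replace.go, pvRep]
    | cons c t =>
      rw [PySem.Chars.replace.go]
      by_cases h : old.isPrefixOf (c :: t)
      · rw [if_pos h]
        have hlen : (List.drop old.length (c :: t)).length ≤ n := by
          have : 1 ≤ old.length := by cases old <;> simp_all
          simp [List.length_drop] at *
          omega
        rw [ih _ _ hlen]
        have hdrop : List.drop old.length (c :: t) = t.drop (old.length - 1) := by
          obtain ⟨o, os, rfl⟩ : ∃ o os, old = o :: os := by
            cases old with
            | nil => exact absurd rfl ho
            | cons o os => exact ⟨o, os, rfl⟩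
          simp
        rw [hdrop, pvRep, if_pos h]
        simp
      · rw [if_neg h]
        have hlen : t.length ≤ n := by simp at hl; omega
        rw [ih _ _ hlen, pvRep, if_neg h]
        simp

lemma pv_replace_eq (old new : List Char) (ho : old ≠ []) (s : List Char) :
    PySem.Chars.replace s old new = pvRep old new s := by
  unfold PySem.Chars.replace
  rw [if_neg (by simpa using ho)]
  simpa using pv_go_spec old new ho s.length s [] le_rfl

lemma pv_str_replace_eq (s old new : String) (h : old.toList ≠ []) :
    PySem.Str.replace s old new = String.ofList (pvRep old.toList new.toList s.toList) := by
  simp [PySem.Str.replace, pv_replace_eq _ _ h]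

-- step lemmas for pvRep
lemma pvRep_nil (old new : List Char) : pvRep old new [] = [] := by simp [pvRep]

lemma pvRep_cons_ne (d : Char) (ds new : List Char) (c : Char) (t : List Char) (h : d ≠ c) :
    pvRep (d :: ds) new (c :: t) = c :: pvRep (d :: ds) new t := by
  rw [pvRep, if_neg]
  simp [List.isPrefixOf, h]

lemma pvRep_cons2_ne (a b : Char) (new : List Char) (t : List Char) (h : t.head? ≠ some b) :
    pvRep [a, b] new (a :: t) = a :: pvRep [a, b] new t := by
  rw [pvRep, if_neg]
  cases t with
  | nil => simp [List.isPrefixOf]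
  | cons x xs =>
    simp only [List.head?] at h
    simp [List.isPrefixOf]
    exact fun hh => absurd (congrArg some hh.symm) h

lemma pvRep_match2 (a b : Char) (new : List Char) (e : Char) (t : List Char) (he : e = b) :
    pvRep [a, b] new (a :: e :: t) = new ++ pvRep [a, b] new t := by
  subst he
  rw [pvRep, if_pos (by simp [List.isPrefixOf])]
  simp

lemma pvRep_append (d : Char) (ds new : List Char) (A : List Char) (h : ∀ x ∈ A, d ≠ x) :
    ∀ X, pvRep (d :: ds) new (A ++ X) = A ++ pvRep (d :: ds) new X := by
  induction A with
  | nil => intro X; simp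
  | cons a A ih =>
    intro X
    rw [List.cons_append, pvRep_cons_ne _ _ _ _ _ (h a (by simp)), ih (fun x hx => h x (by simp [hx]))]
    rfl

lemma pvRep_head_ne (old new : List Char) (d : Char) (hn : new ≠ []) (h1 : new.head? ≠ some d)
    (X : List Char) (h2 : X.head? ≠ some d) : (pvRep old new X).head? ≠ some d := by
  cases X with
  | nil => simp [pvRep]
  | cons c t =>
    rw [pvRep]
    split_ifs with h
    · cases new with
      | nil => exact absurd rfl hn
      | cons n ns => simpa using h1
    · simpa using h2

-- A's chain of six replaces, on the char-list level
def pvChain (l : List Char) : List Char :=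
  pvRep ['q', '4'] ['Q', '4'] (pvRep ['q', '3'] ['Q', '3'] (pvRep ['q', '2'] ['Q', '2']
    (pvRep ['q', '1'] ['Q', '1'] (pvRep ['$'] pvRepl (pvRep ['u', 's', 'd'] pvRepl l)))))

lemma pv_A_eq_chain (text : String) : standardize_terms text = String.ofList (pvChain text.toList) := by
  show (List.foldl (fun t p => PySem.Str.replace t p.1 p.2) text
      ((PySem.Dict.ofList
        [("usd", "U.S. dollars"), ("$", "U.S. dollars"),
         ("q1", "Q1"), ("q2", "Q2"), ("q3", "Q3"), ("q4", "Q4")] : PySem.Dict String String).items)) = _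
  rw [show ((PySem.Dict.ofList
        [("usd", "U.S. dollars"), ("$", "U.S. dollars"),
         ("q1", "Q1"), ("q2", "Q2"), ("q3", "Q3"), ("q4", "Q4")] : PySem.Dict String String).items) =
      [("usd", "U.S. dollars"), ("$", "U.S. dollars"),
       ("q1", "Q1"), ("q2", "Q2"), ("q3", "Q3"), ("q4", "Q4")] from rfl]
  simp only [List.foldl]
  rw [pv_str_replace_eq _ _ _ (by decide), pv_str_replace_eq _ _ _ (by decide),
      pv_str_replace_eq _ _ _ (by decide), pv_str_replace_eq _ _ _ (by decide),
      pv_str_replace_eq _ _ _ (by decide), pv_str_replace_eq _ _ _ (by decide)]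
  simp only [String.toList_ofList]
  rfl

set_option maxRecDepth 8192 in
lemma pv_q_notin_repl : ∀ x ∈ pvRepl, 'q' ≠ x := by
  intro x hx
  fin_cases hx <;> decide

set_option maxRecDepth 8192 in
lemma pv_dollar_notin_repl : ∀ x ∈ pvRepl, '$' ≠ x := by
  intro x hx
  fin_cases hx <;> decide

-- the core: the six sequential passes compute exactly B's one-pass scan
lemma pv_chain_eq_scan (l : List Char) : pvChain l = pvScan l := by
  cases l with
  | nil => simp [pvChain, pvRep_nil, pvScan]
  | cons c t =>
    by_cases hd : c = '$'
    · -- '$': the 'usd' pass keeps it, the '$' pass rewrites it, the rest keep the result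
      subst hd
      rw [pvScan, if_pos rfl]
      unfold pvChain
      rw [pvRep_cons_ne 'u' _ _ '$' _ (by decide)]
      rw [pvRep, if_pos (by simp [List.isPrefixOf])]
      simp only [List.length_cons, List.length_nil, Nat.zero_add, Nat.sub_self, List.drop_zero]
      rw [pvRep_append 'q' _ _ pvRepl pv_q_notin_repl, pvRep_append 'q' _ _ pvRepl pv_q_notin_repl,
          pvRep_append 'q' _ _ pvRepl pv_q_notin_repl, pvRep_append 'q' _ _ pvRepl pv_q_notin_repl]
      have hrec := pv_chain_eq_scan t
      unfold pvChain at hrec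
      rw [hrec]
    · by_cases husd : c = 'u' ∧ ['s', 'd'].isPrefixOf t
      · -- 'usd': the first pass rewrites it; no later term starts inside 'U.S. dollars'
        obtain ⟨rfl, hp⟩ := husd
        obtain ⟨r, rfl⟩ : ∃ r, t = 's' :: 'd' :: r := by
          obtain ⟨r, hr⟩ := List.isPrefixOf_iff_prefix.mp hp
          exact ⟨r, hr.symm⟩
        rw [pvScan, if_neg (by decide), if_pos ⟨rfl, by simp [List.isPrefixOf]⟩]
        unfold pvChain
        rw [pvRep, if_pos (by simp [List.isPrefixOf])]
        simp only [List.length_cons, List.length_nil, List.drop_succ_cons,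
          Nat.zero_add, Nat.reduceAdd, Nat.reduceSub, List.drop]
        rw [pvRep_append '$' _ _ pvRepl pv_dollar_notin_repl, pvRep_append 'q' _ _ pvRepl pv_q_notin_repl,
            pvRep_append 'q' _ _ pvRepl pv_q_notin_repl, pvRep_append 'q' _ _ pvRepl pv_q_notin_repl,
            pvRep_append 'q' _ _ pvRepl pv_q_notin_repl]
        have hrec := pv_chain_eq_scan r
        unfold pvChain at hrec
        rw [hrec]
      · by_cases hq : c = 'q' ∧ (t.head? = some '1' ∨ t.head? = some '2' ∨ t.head? = some '3' ∨ t.head? = some '4')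
        · -- 'q1'..'q4': pass k rewrites it; 'Qk' survives the remaining passes
          obtain ⟨rfl, he⟩ := hq
          obtain ⟨e, r, rfl, he4⟩ : ∃ e r, t = e :: r ∧ (e = '1' ∨ e = '2' ∨ e = '3' ∨ e = '4') := by
            cases t with
            | nil => simp at he
            | cons e r => exact ⟨e, r, rfl, by simpa using he⟩
          rw [pvScan, if_neg (by decide), if_neg (by rintro ⟨h, -⟩; exact absurd h (by decide)),
              if_pos ⟨rfl, by simpa using he⟩]
          simp only [List.head?_cons, Option.getD_some, List.tail_cons]
          unfold pvChain
          rw [pvRep_cons_ne 'u' _ _ 'q' _ (by decide),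
              pvRep_cons_ne 'u' _ _ e _ (by rcases he4 with rfl | rfl | rfl | rfl <;> decide),
              pvRep_cons_ne '$' _ _ 'q' _ (by decide),
              pvRep_cons_ne '$' _ _ e _ (by rcases he4 with rfl | rfl | rfl | rfl <;> decide)]
          have hrec := pv_chain_eq_scan r
          unfold pvChain at hrec
          rcases he4 with rfl | rfl | rfl | rfl
          · rw [pvRep_match2 'q' '1' _ '1' _ rfl]
            simp only [List.cons_append, List.nil_append]
            rw [pvRep_cons_ne 'q' _ _ 'Q' _ (by decide), pvRep_cons_ne 'q' _ _ '1' _ (by decide),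
                pvRep_cons_ne 'q' _ _ 'Q' _ (by decide), pvRep_cons_ne 'q' _ _ '1' _ (by decide),
                pvRep_cons_ne 'q' _ _ 'Q' _ (by decide), pvRep_cons_ne 'q' _ _ '1' _ (by decide)]
            rw [hrec]
          · rw [pvRep_cons2_ne 'q' '1' _ _ (by simp), pvRep_cons_ne 'q' _ _ '2' _ (by decide),
                pvRep_match2 'q' '2' _ '2' _ rfl]
            simp only [List.cons_append, List.nil_append]
            rw [pvRep_cons_ne 'q' _ _ 'Q' _ (by decide), pvRep_cons_ne 'q' _ _ '2' _ (by decide),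
                pvRep_cons_ne 'q' _ _ 'Q' _ (by decide), pvRep_cons_ne 'q' _ _ '2' _ (by decide)]
            rw [hrec]
          · rw [pvRep_cons2_ne 'q' '1' _ _ (by simp), pvRep_cons_ne 'q' _ _ '3' _ (by decide),
                pvRep_cons2_ne 'q' '2' _ _ (by simp), pvRep_cons_ne 'q' _ _ '3' _ (by decide),
                pvRep_match2 'q' '3' _ '3' _ rfl]
            simp only [List.cons_append, List.nil_append]
            rw [pvRep_cons_ne 'q' _ _ 'Q' _ (by decide), pvRep_cons_ne 'q' _ _ '3' _ (by decide)]
            rw [hrec]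
          · rw [pvRep_cons2_ne 'q' '1' _ _ (by simp), pvRep_cons_ne 'q' _ _ '4' _ (by decide),
                pvRep_cons2_ne 'q' '2' _ _ (by simp), pvRep_cons_ne 'q' _ _ '4' _ (by decide),
                pvRep_cons2_ne 'q' '3' _ _ (by simp), pvRep_cons_ne 'q' _ _ '4' _ (by decide),
                pvRep_match2 'q' '4' _ '4' _ rfl]
            simp only [List.cons_append, List.nil_append]
            rw [hrec]
        · -- no term starts here: every pass keeps the leading character
          rw [pvScan, if_neg hd, if_neg husd, if_neg hq]
          push Not at hq
          unfold pvChain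
          have hrec := pv_chain_eq_scan t
          unfold pvChain at hrec
          by_cases hcq : c = 'q'
          · subst hcq
            have hne := hq rfl
            have h1 : (pvRep ['$'] pvRepl (pvRep ['u','s','d'] pvRepl t)).head? ≠ some '1' :=
              pvRep_head_ne _ _ _ (by decide) (by decide) _
                (pvRep_head_ne _ _ _ (by decide) (by decide) _ hne.1)
            have h2 : (pvRep ['q','1'] ['Q','1'] (pvRep ['$'] pvRepl (pvRep ['u','s','d'] pvRepl t))).head? ≠ some '2' :=
              pvRep_head_ne _ _ _ (by decide) (by decide) _
                (pvRep_head_ne _ _ _ (by decide) (by decide) _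
                  (pvRep_head_ne _ _ _ (by decide) (by decide) _ hne.2.1))
            have h3 : (pvRep ['q','2'] ['Q','2'] (pvRep ['q','1'] ['Q','1'] (pvRep ['$'] pvRepl (pvRep ['u','s','d'] pvRepl t)))).head? ≠ some '3' :=
              pvRep_head_ne _ _ _ (by decide) (by decide) _
                (pvRep_head_ne _ _ _ (by decide) (by decide) _
                  (pvRep_head_ne _ _ _ (by decide) (by decide) _
                    (pvRep_head_ne _ _ _ (by decide) (by decide) _ hne.2.2.1)))
            have h4 : (pvRep ['q','3'] ['Q','3'] (pvRep ['q','2'] ['Q','2'] (pvRep ['q','1'] ['Q','1'] (pvRep ['$'] pvRepl (pvRep ['u','s','d'] pvRepl t))))).head? ≠ some '4' :=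
              pvRep_head_ne _ _ _ (by decide) (by decide) _
                (pvRep_head_ne _ _ _ (by decide) (by decide) _
                  (pvRep_head_ne _ _ _ (by decide) (by decide) _
                    (pvRep_head_ne _ _ _ (by decide) (by decide) _
                      (pvRep_head_ne _ _ _ (by decide) (by decide) _ hne.2.2.2))))
            rw [pvRep_cons_ne 'u' _ _ 'q' _ (by decide), pvRep_cons_ne '$' _ _ 'q' _ (by decide),
                pvRep_cons2_ne 'q' '1' _ _ h1, pvRep_cons2_ne 'q' '2' _ _ h2,
                pvRep_cons2_ne 'q' '3' _ _ h3, pvRep_cons2_ne 'q' '4' _ _ h4]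
            rw [hrec]
          · by_cases hcu : c = 'u'
            · subst hcu
              have hpu : ¬ (['u','s','d'].isPrefixOf ('u' :: t) = true) := by
                intro h
                exact husd ⟨rfl, by simpa [List.isPrefixOf] using h⟩
              rw [pvRep, if_neg hpu]
              rw [pvRep_cons_ne '$' _ _ 'u' _ (by decide),
                  pvRep_cons_ne 'q' _ _ 'u' _ (by decide), pvRep_cons_ne 'q' _ _ 'u' _ (by decide),
                  pvRep_cons_ne 'q' _ _ 'u' _ (by decide), pvRep_cons_ne 'q' _ _ 'u' _ (by decide)]
              rw [hrec]
            · rw [pvRep_cons_ne 'u' _ _ c _ (fun h => hcu h.symm),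
                  pvRep_cons_ne '$' _ _ c _ (fun h => hd h.symm),
                  pvRep_cons_ne 'q' _ _ c _ (fun h => hcq h.symm),
                  pvRep_cons_ne 'q' _ _ c _ (fun h => hcq h.symm),
                  pvRep_cons_ne 'q' _ _ c _ (fun h => hcq h.symm),
                  pvRep_cons_ne 'q' _ _ c _ (fun h => hcq h.symm)]
              rw [hrec]
termination_by l.length
decreasing_by all_goals (subst_vars; simp; try omega)

-- ===== VERDICT (by name: the statement is the Claim_ definition above) =====
theorem standardize_terms_spec : Claim_equal_standardize_terms := by
  intro text _
  show standardize_terms text = standardize_terms_alt text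
  rw [pv_A_eq_chain, pv_chain_eq_scan]
  rfl
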